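-- pv_equiv track=rewrite | github.com/Yawn-Sean/Daily_CF_Problems | daily_problems/2024/08/0826/personal_submission/cf432c_catchfree1225.py | build
-- ===== SOURCE A (Python) =====
-- def build(n): # 預處理歌德巴赫pair
--     primes = []
--     is_prime = [False] * 2 + [True] * (n - 1)
--     for i in range(2, n + 1): # !注意:找質數要全部遍歷
--         if is_prime[i]:
--             primes.append(i)
--             for j in range(i * i, n + 1, i):
--                 is_prime[j] = False
--
--     divs = [0] * (n + 1) # 合為偶數的質數配對
--     for i in range(4, n + 1, 2):
--         for p in primes:
--             if is_prime[i - p]: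
--                 divs[i] = p
--                 break
--     return is_prime, divs
-- ===== SOURCE B (Python) =====
-- def build(n):
--     # Primality by per-number trial division (no shared mutable sieve); the arrays are
--     # built by comprehensions, and the Goldbach pairing loop is the same as in A.
--     def isp(m):
--         if m < 2:
--             return False
--         d = 2
--         while d * d <= m:
--             if m % d == 0:
--                 return False
--             d += 1
--         return True
--     is_prime = [False, False] + [isp(i) for i in range(2, n + 1)]
--     primes = [i for i in range(2, n + 1) if is_prime[i]]
--     divs = [0] * (n + 1)
--     for i in range(4, n + 1, 2):
--         for p in primes:
--             if is_prime[i - p]: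
--                 divs[i] = p
--                 break
--     return is_prime, divs
-- ===== Notes on version B (the rewrite author's own statement) =====
-- stated objective: alternative
-- what changed: The shared mutable Eratosthenes sieve is replaced by per-number trial-division primality with the is_prime and primes arrays built by comprehensions; the Goldbach pairing loop is unchanged.
import Mathlib
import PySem

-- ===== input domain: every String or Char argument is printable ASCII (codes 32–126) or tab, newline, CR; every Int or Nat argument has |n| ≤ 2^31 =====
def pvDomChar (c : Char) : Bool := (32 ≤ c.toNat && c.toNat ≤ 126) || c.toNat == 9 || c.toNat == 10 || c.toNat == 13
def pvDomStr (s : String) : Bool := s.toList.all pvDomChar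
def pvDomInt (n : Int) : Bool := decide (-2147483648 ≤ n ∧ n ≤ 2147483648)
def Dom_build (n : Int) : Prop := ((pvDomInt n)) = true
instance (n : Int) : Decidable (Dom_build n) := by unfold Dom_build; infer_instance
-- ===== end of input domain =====

-- B replaces A's mutable Eratosthenes sieve by per-number trial-division primality with the
-- arrays built by comprehensions; the Goldbach pairing loop is unchanged (objective:
-- alternative algorithm for the primality tables; not faster).

-- ===== PORT A =====
-- shared first half: the sieve loop is textually identical in Source A and Source B
-- (list writes use PySem.List.pySetD; every index written is in range, see Pre_ note)
def sieveLoop (n : Int) : List Int × List Bool :=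
  (PySem.List.pyRange 2 (n + 1) 1).foldl
    (fun st i =>
      if PySem.List.pyGetD st.2 i false then
        (st.1 ++ [i],
         (PySem.List.pyRange (i * i) (n + 1) i).foldl
           (fun ip j => PySem.List.pySetD ip j false) st.2)
      else st)
    ([], [false, false] ++ List.replicate (n - 1).toNat true)

def build (n : Int) : List Bool × List Int :=
  let st := sieveLoop n
  let primes := st.1
  let is_prime := st.2
  let divs :=
    (PySem.List.pyRange 4 (n + 1) 2).foldl
      (fun divs i =>
        match primes.find? (fun p => PySem.List.pyGetD is_prime (i - p) false) with
        | some p => PySem.List.pySetD divs i p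
        | none => divs)
      (List.replicate (n + 1).toNat 0)
  (is_prime, divs)
-- ===== PORT B =====
-- trial-division primality test of Source B: 'while d * d <= m: ...'
def ispLoop (m d : Int) : Bool :=
  if d * d ≤ m then
    if PySem.Int.mod m d = 0 then false
    else ispLoop m (d + 1)
  else true
termination_by (m + 1 - d).toNat
decreasing_by
  have hdm : d ≤ m := by
    by_cases h : d ≤ 0
    · nlinarith
    · nlinarith
  omega

def isp (m : Int) : Bool :=
  if m < 2 then false else ispLoop m 2

def build_alt (n : Int) : List Bool × List Int :=
  let is_prime : List Bool :=
    [false, false] ++ (PySem.List.pyRange 2 (n + 1) 1).map (fun i => isp i)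
  let primes : List Int :=
    (PySem.List.pyRange 2 (n + 1) 1).filter (fun i => PySem.List.pyGetD is_prime i false)
  let divs :=
    (PySem.List.pyRange 4 (n + 1) 2).foldl
      (fun divs i =>
        match primes.find? (fun p => PySem.List.pyGetD is_prime (i - p) false) with
        | some p => PySem.List.pySetD divs i p
        | none => divs)
      (List.replicate (n + 1).toNat 0)
  (is_prime, divs)

-- ===== PRECONDITION & SPEC =====
-- no Pre_: the Python A returns normally on every int input

def Spec_build (n : Int) (out : List Bool × List Int) : Prop := out = build_alt n
instance (n : Int) (out : List Bool × List Int) : Decidable (Spec_build n out) := by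
  unfold Spec_build; infer_instance

-- ===== CLAIM (what is proved, stated in full; the proofs are below) =====
def Claim_equal_build : Prop := ∀ (n : Int), Dom_build n → Spec_build n (build n)

-- ===== LEMMAS AND PROOFS =====

lemma len_fold_setFalse (L : List Int) (ip : List Bool) :
    (L.foldl (fun a j => PySem.List.pySetD a j false) ip).length = ip.length := by
  induction L generalizing ip with
  | nil => rfl
  | cons t L ih => rw [List.foldl_cons, ih, PySem.List.length_pySetD]

-- effect of the sieve's inner write loop on an entry (all written indices nonnegative)
lemma getD_fold_setFalse (L : List Int) (hL : ∀ t ∈ L, 0 ≤ t) (ip : List Bool) (j : ℕ) :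
    (L.foldl (fun a t => PySem.List.pySetD a t false) ip).getD j false
      = if (j : Int) ∈ L then false else ip.getD j false := by
  induction L generalizing ip with
  | nil => simp
  | cons t L ih =>
    have ht : 0 ≤ t := hL t (List.mem_cons_self ..)
    rw [List.foldl_cons, ih (fun x hx => hL x (List.mem_cons_of_mem _ hx))]
    have hset : ∀ v : Bool, (PySem.List.pySetD ip t v).getD j false
        = if t = (j : Int) then (if j < ip.length then v else false) else ip.getD j false := by
      intro v
      rw [PySem.List.pySetD_of_nonneg _ _ ht]
      by_cases hjt : t = (j : Int)
      · have : t.toNat = j := by omega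
        simp only [List.getD, List.getElem?_set, hjt, if_pos]
        by_cases hlt : j < ip.length <;> simp [hlt]
      · have : t.toNat ≠ j := by omega
        simp [List.getD, this, hjt]
    by_cases hj : (j : Int) ∈ L
    · simp [hj]
    · rw [if_neg hj, hset]
      by_cases hjt : t = (j : Int)
      · have hmem : (j : Int) ∈ t :: L := by rw [← hjt]; exact List.mem_cons_self ..
        rw [if_pos hjt, if_pos hmem]
        split <;> rfl
      · rw [if_neg hjt, if_neg (by
          rintro h
          rcases List.mem_cons.1 h with h | h
          · exact hjt h.symm
          · exact hj h)]

-- the sieve loop's step function (definitionally the lambda in sieveLoop)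
def sieveStep (n : Int) (st : List Int × List Bool) (i : Int) : List Int × List Bool :=
  if PySem.List.pyGetD st.2 i false then
    (st.1 ++ [i],
     (PySem.List.pyRange (i * i) (n + 1) i).foldl
       (fun ip j => PySem.List.pySetD ip j false) st.2)
  else st

-- sieve invariant after all outer iterations below m have run
def SieveInv (n : Int) (m : ℕ) (st : List Int × List Bool) : Prop :=
  st.2.length = 2 + (n - 1).toNat ∧
  st.1.Pairwise (· < ·) ∧
  (∀ p ∈ st.1, 2 ≤ p ∧ p < (m : Int)) ∧
  (∀ j : ℕ, 2 ≤ j → j < m → (st.2.getD j false = true ↔ (j : Int) ∈ st.1)) ∧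
  (∀ j : ℕ, (j : Int) ≤ n → st.2.getD j false = false →
      j < 2 ∨ ∃ a b : ℕ, 2 ≤ a ∧ 2 ≤ b ∧ a * b = j) ∧
  (∀ j : ℕ, (j : Int) ≤ n → 2 ≤ j →
      (∃ f : ℕ, Nat.Prime f ∧ f < m ∧ f ∣ j ∧ f * f ≤ j) → st.2.getD j false = false) ∧
  st.2.getD 0 false = false ∧ st.2.getD 1 false = false

lemma sieve_step_inv (n : Int) (m : ℕ) (h2 : 2 ≤ m) (hmn : (m : Int) ≤ n)
    (st : List Int × List Bool) (h : SieveInv n m st) :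
    SieveInv n (m + 1) (sieveStep n st (m : Int)) := by
  obtain ⟨hlen, hsort, hbound, hiff, hcomp, hsound, h0, h1⟩ := h
  have hm2 : (2 : Int) ≤ (m : Int) := by exact_mod_cast h2
  unfold sieveStep
  rw [PySem.List.pyGetD_natCast]
  by_cases hm : st.2.getD m false = true
  · rw [if_pos hm]
    set L := PySem.List.pyRange ((m : Int) * (m : Int)) (n + 1) (m : Int) with hLdef
    have hmem : ∀ t ∈ L, (m : Int) * (m : Int) ≤ t ∧ t < n + 1 ∧ (m : Int) ∣ t - (m : Int) * (m : Int) := by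
      intro t ht
      rw [hLdef, PySem.List.mem_pyRange_iff_of_pos (by omega)] at ht
      exact ht
    have hLpos : ∀ t ∈ L, 0 ≤ t := by
      intro t ht
      have := (hmem t ht).1
      nlinarith
    have hLbig : ∀ t ∈ L, (m : Int) < t := by
      intro t ht
      have := (hmem t ht).1
      nlinarith
    refine ⟨?_, ?_, ?_, ?_, ?_, ?_, ?_, ?_⟩
    · rw [len_fold_setFalse]; exact hlen
    · rw [List.pairwise_append]
      exact ⟨hsort, List.pairwise_singleton _ _, fun a ha b hb => by
        rw [List.mem_singleton] at hb
        subst hb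
        exact (hbound a ha).2⟩
    · intro p hp
      rcases List.mem_append.1 hp with h | h
      · have := hbound p h; push_cast; omega
      · rw [List.mem_singleton] at h; subst h; push_cast; omega
    · intro j hj2 hjm
      rw [getD_fold_setFalse L hLpos]
      have hjL : ((j : ℕ) : Int) ∉ L := by
        intro hin
        have := hLbig _ hin
        omega
      rw [if_neg hjL]
      by_cases hjm' : j < m
      · rw [hiff j hj2 hjm']
        constructor
        · exact fun h => List.mem_append_left _ h
        · intro h
          rcases List.mem_append.1 h with h | h
          · exact h
          · rw [List.mem_singleton] at h
            exfalso; omega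
      · have hjeq : j = m := by omega
        subst hjeq
        simp only [hm, true_iff]
        exact List.mem_append_right _ (List.mem_singleton.2 rfl)
    · intro j hjn hfalse
      rw [getD_fold_setFalse L hLpos] at hfalse
      by_cases hjL : ((j : ℕ) : Int) ∈ L
      · obtain ⟨hlo, hhi, c, hc⟩ := hmem _ hjL
        have hc0 : 0 ≤ c := by nlinarith
        right
        refine ⟨m, ((m : Int) + c).toNat, h2, by omega, ?_⟩
        have hgoal : ((m * ((m : Int) + c).toNat : ℕ) : Int) = (j : Int) := by
          push_cast
          rw [Int.toNat_of_nonneg (by omega), mul_add]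
          omega
        exact_mod_cast hgoal
      · rw [if_neg hjL] at hfalse
        exact hcomp j hjn hfalse
    · intro j hjn hj2 hex
      obtain ⟨f, hfp, hfm, hfd, hfsq⟩ := hex
      rw [getD_fold_setFalse L hLpos]
      by_cases hjL : ((j : ℕ) : Int) ∈ L
      · rw [if_pos hjL]
      · rw [if_neg hjL]
        rcases Nat.lt_succ_iff_lt_or_eq.1 hfm with hfm' | rfl
        · exact hsound j hjn hj2 ⟨f, hfp, hfm', hfd, hfsq⟩
        · exfalso
          apply hjL
          rw [hLdef, PySem.List.mem_pyRange_iff_of_pos (by omega)]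
          refine ⟨by exact_mod_cast hfsq, by omega, ?_⟩
          exact dvd_sub (Int.natCast_dvd_natCast.2 hfd) (dvd_mul_right _ _)
    · rw [getD_fold_setFalse L hLpos, if_neg (by intro hin; have := hLbig _ hin; omega)]
      exact h0
    · rw [getD_fold_setFalse L hLpos, if_neg (by intro hin; have := hLbig _ hin; omega)]
      exact h1
  · rw [if_neg hm]
    refine ⟨hlen, hsort, ?_, ?_, hcomp, ?_, h0, h1⟩
    · intro p hp
      have := hbound p hp
      push_cast; omega
    · intro j hj2 hjm
      by_cases hjm' : j < m
      · exact hiff j hj2 hjm'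
      · have hjeq : j = m := by omega
        subst hjeq
        rw [Bool.not_eq_true] at hm
        constructor
        · intro hh
          rw [hm] at hh
          exact absurd hh (by simp)
        · intro hin
          exfalso
          have := (hbound _ hin).2
          omega
    · intro j hjn hj2 hex
      obtain ⟨f, hfp, hfm, hfd, hfsq⟩ := hex
      rcases Nat.lt_succ_iff_lt_or_eq.1 hfm with hfm' | rfl
      · exact hsound j hjn hj2 ⟨f, hfp, hfm', hfd, hfsq⟩
      · exfalso
        rw [Bool.not_eq_true] at hm
        rcases hcomp f hmn hm with h | ⟨a, b, ha, hb, hab⟩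
        · omega
        · exact absurd (hab ▸ hfp) (Nat.not_prime_mul (by omega) (by omega))

lemma sieve_fold_inv (n : Int) : ∀ (k m : ℕ) (st : List Int × List Bool),
    (n + 1 - (m : Int)).toNat ≤ k → 2 ≤ m → (m : Int) ≤ n + 1 → SieveInv n m st →
    SieveInv n (n + 1).toNat ((PySem.List.pyRange (m : Int) (n + 1) 1).foldl (sieveStep n) st) := by
  intro k
  induction k with
  | zero =>
    intro m st hk h2 hm hinv
    have hme : (m : Int) = n + 1 := by omega
    rw [PySem.List.pyRange_one_eq_nil (by omega)]
    have : (n + 1).toNat = m := by omega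
    rw [this]
    exact hinv
  | succ k ih =>
    intro m st hk h2 hm hinv
    by_cases hend : n + 1 ≤ (m : Int)
    · rw [PySem.List.pyRange_one_eq_nil hend]
      have : (n + 1).toNat = m := by omega
      rw [this]
      exact hinv
    · rw [PySem.List.pyRange_one_cons (by omega), List.foldl_cons]
      have hstep := sieve_step_inv n m h2 (by omega) st hinv
      have hcast : ((m : Int) + 1) = ((m + 1 : ℕ) : Int) := by push_cast; ring
      rw [hcast]
      exact ih (m + 1) _ (by omega) (by omega) (by push_cast; omega) hstep

lemma sieve_props (n : Int) : SieveInv n (n + 1).toNat (sieveLoop n) := by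
  have hfun : (fun (st : List Int × List Bool) i =>
      if PySem.List.pyGetD st.2 i false then
        (st.1 ++ [i],
         (PySem.List.pyRange (i * i) (n + 1) i).foldl
           (fun ip j => PySem.List.pySetD ip j false) st.2)
      else st) = sieveStep n := rfl
  have hinit0 : ([false, false] ++ List.replicate (n - 1).toNat true).getD 0 false = false := rfl
  have hinit1 : ([false, false] ++ List.replicate (n - 1).toNat true).getD 1 false = false := rfl
  have hinitlen : ([false, false] ++ List.replicate (n - 1).toNat true).length
      = 2 + (n - 1).toNat := by simp; omega
  by_cases hn : 1 ≤ n
  · have hinit : SieveInv n 2 (([] : List Int), [false, false] ++ List.replicate (n - 1).toNat true) := by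
      refine ⟨hinitlen, List.Pairwise.nil, by simp, by omega, ?_,
        (by rintro j _ _ ⟨f, hfp, hfm, -, -⟩; exact absurd hfp.two_le (by omega)), hinit0, hinit1⟩
      intro j hjn hfalse
      by_cases hj2 : j < 2
      · exact Or.inl hj2
      · exfalso
        obtain ⟨j', rfl⟩ : ∃ j', j = j' + 2 := ⟨j - 2, by omega⟩
        have : ([false, false] ++ List.replicate (n - 1).toNat true).getD (j' + 2) false = true := by
          simp [List.getD, show j' < n.toNat - 1 from by omega]
        rw [this] at hfalse
        exact absurd hfalse (by simp)
    unfold sieveLoop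
    rw [hfun]
    have := sieve_fold_inv n ((n - 1).toNat) 2 _ (by omega) (by omega) (by omega) hinit
    simpa using this
  · unfold sieveLoop
    rw [hfun, show ((2 : Int)) = ((2 : ℕ) : Int) by norm_num,
      PySem.List.pyRange_one_eq_nil (by push_cast; omega), List.foldl_nil]
    refine ⟨hinitlen, List.Pairwise.nil, by simp, by omega, ?_,
      (by rintro j _ _ ⟨f, hfp, hfm, -, -⟩; exact absurd hfp.two_le (by omega)), hinit0, hinit1⟩
    intro j hjn _
    left
    omega

lemma primes_bound (n : Int) : ∀ p ∈ (sieveLoop n).1, 2 ≤ p ∧ p ≤ n := by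
  intro p hp
  have := (sieve_props n).2.2.1 p hp
  omega

lemma is_prime_iff (n : Int) (j : ℕ) (h2 : 2 ≤ j) (hn : (j : Int) ≤ n) :
    ((sieveLoop n).2.getD j false = true ↔ (j : Int) ∈ (sieveLoop n).1) := by
  exact (sieve_props n).2.2.2.1 j h2 (by omega)

lemma prime_mem (n : Int) (p : ℕ) (hp : Nat.Prime p) (hn : (p : Int) ≤ n) :
    (p : Int) ∈ (sieveLoop n).1 := by
  have h2 := hp.two_le
  by_cases hget : (sieveLoop n).2.getD p false = true
  · exact (is_prime_iff n p h2 hn).1 hget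
  · exfalso
    rw [Bool.not_eq_true] at hget
    rcases (sieve_props n).2.2.2.2.1 p hn hget with h | ⟨a, b, ha, hb, hab⟩
    · omega
    · have hdvd : a ∣ p := ⟨b, hab.symm⟩
      rcases (Nat.Prime.eq_one_or_self_of_dvd hp a hdvd) with h | h
      · omega
      · subst h
        have hb1 : b = 1 :=
          Nat.eq_of_mul_eq_mul_left (by omega) (hab.trans (Nat.mul_one a).symm)
        omega

-- two strictly sorted lists with the same members are equal
lemma sorted_eq_of_mem_iff : ∀ (l1 l2 : List Int), l1.Pairwise (· < ·) → l2.Pairwise (· < ·) →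
    (∀ x, x ∈ l1 ↔ x ∈ l2) → l1 = l2 := by
  intro l1
  induction l1 with
  | nil =>
    intro l2 _ _ hm
    cases l2 with
    | nil => rfl
    | cons y l2 => exact absurd ((hm y).2 (List.mem_cons_self ..)) (List.not_mem_nil)
  | cons x l1 ih =>
    intro l2 h1 h2 hm
    cases l2 with
    | nil => exact absurd ((hm x).1 (List.mem_cons_self ..)) (List.not_mem_nil)
    | cons y l2 =>
      have hxy : x = y := by
        rcases List.mem_cons.1 ((hm x).1 (List.mem_cons_self ..)) with h | h
        · exact h
        rcases List.mem_cons.1 ((hm y).2 (List.mem_cons_self ..)) with h' | h'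
        · exact h'.symm
        · have hx := (List.pairwise_cons.1 h2).1 x h
          have hy := (List.pairwise_cons.1 h1).1 y h'
          omega
      subst hxy
      congr 1
      apply ih l2 (List.pairwise_cons.1 h1).2 (List.pairwise_cons.1 h2).2
      intro z
      constructor
      · intro hz
        have hzx : x < z := (List.pairwise_cons.1 h1).1 z hz
        rcases List.mem_cons.1 ((hm z).1 (List.mem_cons_of_mem _ hz)) with h | h
        · omega
        · exact h
      · intro hz
        have hzx : x < z := (List.pairwise_cons.1 h2).1 z hz
        rcases List.mem_cons.1 ((hm z).2 (List.mem_cons_of_mem _ hz)) with h | h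
        · omega
        · exact h

-- the sieve array is sound: a surviving entry has no nontrivial factor
lemma sieve_true_iff_prime (n : Int) (j : ℕ) (h2 : 2 ≤ j) (hn : (j : Int) ≤ n) :
    ((sieveLoop n).2.getD j false = true ↔ Nat.Prime j) := by
  constructor
  · intro htrue
    by_contra hnp
    have hsound := (sieve_props n).2.2.2.2.2.1
    have hf := Nat.minFac_prime (show j ≠ 1 by omega)
    have hfd := Nat.minFac_dvd j
    have hfsq : j.minFac * j.minFac ≤ j := by
      have := Nat.minFac_sq_le_self (show 0 < j by omega) hnp
      nlinarith [this]
    have h2f := hf.two_le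
    have hlt : j.minFac < j := by nlinarith
    have := hsound j hn h2 ⟨j.minFac, hf, by omega, hfd, hfsq⟩
    rw [htrue] at this
    exact absurd this (by simp)
  · intro hp
    exact (is_prime_iff n j h2 hn).2 (prime_mem n j hp hn)

-- the trial-division loop finds exactly the divisors ≥ d
lemma ispLoop_false_iff : ∀ (k : ℕ) (m d : Int), (m + 1 - d).toNat ≤ k → 0 ≤ m → 1 ≤ d →
    (ispLoop m d = false ↔ ∃ e, d ≤ e ∧ e * e ≤ m ∧ e ∣ m) := by
  intro k
  induction k with
  | zero =>
    intro m d hk hm hd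
    have hdm : ¬ d * d ≤ m := by
      intro hle
      have : d ≤ m := by nlinarith
      omega
    rw [ispLoop, if_neg hdm]
    constructor
    · intro h; exact absurd h (by simp)
    · rintro ⟨e, he, hee, -⟩
      exfalso
      nlinarith
  | succ k ih =>
    intro m d hk hm hd
    rw [ispLoop]
    by_cases hle : d * d ≤ m
    · rw [if_pos hle]
      by_cases hmod : PySem.Int.mod m d = 0
      · rw [if_pos hmod]
        have hdvd : d ∣ m := (PySem.Int.mod_eq_zero_iff_dvd m d).1 hmod
        simp only [true_iff]
        exact ⟨d, le_refl d, hle, hdvd⟩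
      · rw [if_neg hmod]
        have hndvd : ¬ d ∣ m := fun h =>
          hmod ((PySem.Int.mod_eq_zero_iff_dvd m d).2 h)
        have hdm : d ≤ m := by nlinarith
        rw [ih m (d + 1) (by omega) hm (by omega)]
        constructor
        · rintro ⟨e, he, hee, hed⟩
          exact ⟨e, by omega, hee, hed⟩
        · rintro ⟨e, he, hee, hed⟩
          refine ⟨e, ?_, hee, hed⟩
          rcases eq_or_lt_of_le he with h | h
          · exact absurd (h ▸ hed) hndvd
          · omega
    · rw [if_neg hle]
      constructor
      · intro h; exact absurd h (by simp)
      · rintro ⟨e, he, hee, -⟩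
        exfalso
        nlinarith

-- trial division is correct
lemma isp_iff_prime (j : ℕ) : (isp (j : Int) = true) ↔ Nat.Prime j := by
  unfold isp
  by_cases hj2 : (j : Int) < 2
  · rw [if_pos hj2]
    constructor
    · intro h; exact absurd h (by simp)
    · intro hp; exact absurd hp.two_le (by omega)
  · rw [if_neg hj2]
    have hloop := ispLoop_false_iff ((j : Int) + 1 - 2).toNat (j : Int) 2 le_rfl (by omega) (by omega)
    constructor
    · intro htrue
      have hne : ¬ ∃ e : Int, 2 ≤ e ∧ e * e ≤ (j : Int) ∧ e ∣ (j : Int) := by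
        intro hex
        have := hloop.2 hex
        rw [htrue] at this
        exact absurd this (by simp)
      by_contra hnp
      apply hne
      have hf := Nat.minFac_prime (show j ≠ 1 by omega)
      have hfsq : j.minFac * j.minFac ≤ j := by
        have := Nat.minFac_sq_le_self (show 0 < j by omega) hnp
        nlinarith [this]
      refine ⟨(j.minFac : Int), by exact_mod_cast hf.two_le, by exact_mod_cast hfsq, ?_⟩
      exact_mod_cast Int.natCast_dvd_natCast.2 (Nat.minFac_dvd j)
    · intro hp
      by_contra hfalse
      rw [Bool.not_eq_true] at hfalse
      obtain ⟨e, he2, hee, hed⟩ := hloop.1 hfalse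
      have he0 : 0 ≤ e := by omega
      obtain ⟨e', rfl⟩ : ∃ e' : ℕ, e = (e' : Int) := ⟨e.toNat, (Int.toNat_of_nonneg he0).symm⟩
      have hed' : e' ∣ j := Int.natCast_dvd_natCast.1 hed
      rcases (Nat.Prime.eq_one_or_self_of_dvd hp e' hed') with h | h
      · omega
      · subst h
        exfalso
        nlinarith [hee, he2]
-- the two is_prime arrays are equal
lemma is_prime_arrays_eq (n : Int) :
    (sieveLoop n).2 = [false, false] ++ (PySem.List.pyRange 2 (n + 1) 1).map (fun i => isp i) := by
  have hlenA : (sieveLoop n).2.length = 2 + (n - 1).toNat := (sieve_props n).1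
  have hlenB : ([false, false] ++ (PySem.List.pyRange 2 (n + 1) 1).map (fun i => isp i)).length
      = 2 + (n - 1).toNat := by
    simp [PySem.List.length_pyRange_one]
    omega
  apply List.ext_getElem (by rw [hlenA, hlenB])
  intro j hj1 hj2
  rw [hlenA] at hj1
  by_cases hjlt : j < 2
  · interval_cases j
    · have h0 := (sieve_props n).2.2.2.2.2.2.1
      rw [List.getD_eq_getElem _ false (by omega)] at h0
      rw [h0]
      rfl
    · have h1 := (sieve_props n).2.2.2.2.2.2.2
      rw [List.getD_eq_getElem _ false (by omega)] at h1
      rw [h1]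
      rfl
  · have hjn : (j : Int) ≤ n := by omega
    have hB : ([false, false] ++ (PySem.List.pyRange 2 (n + 1) 1).map (fun i => isp i))[j]'hj2
        = isp (j : Int) := by
      rw [List.getElem_append_right (by simp; omega)]
      rw [List.getElem_map]
      rw [PySem.List.getElem_pyRange_one]
      congr 1
      simp
      omega
    rw [hB, ← List.getD_eq_getElem _ false (by omega)]
    have hiffA := sieve_true_iff_prime n j (by omega) hjn
    have hiffB := isp_iff_prime j
    cases hA : (sieveLoop n).2.getD j false <;> cases hBv : isp (j : Int)
    · rfl
    · exfalso
      rw [hA] at hiffA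
      rw [hBv] at hiffB
      exact absurd (hiffB.1 rfl) (fun hp => by simpa using hiffA.2 hp)
    · exfalso
      rw [hA] at hiffA
      rw [hBv] at hiffB
      exact absurd (hiffA.1 rfl) (fun hp => by simpa using hiffB.2 hp)
    · rfl

-- the two primes lists are equal
lemma primes_eq (n : Int) :
    (sieveLoop n).1 = (PySem.List.pyRange 2 (n + 1) 1).filter
      (fun i => PySem.List.pyGetD (sieveLoop n).2 i false) := by
  apply sorted_eq_of_mem_iff
  · exact (sieve_props n).2.1
  · exact List.Pairwise.filter _ (PySem.List.pairwise_lt_pyRange_one 2 (n + 1))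
  · intro x
    constructor
    · intro hx
      have hb := primes_bound n x hx
      rw [List.mem_filter]
      constructor
      · rw [PySem.List.mem_pyRange_one]
        omega
      · obtain ⟨x', rfl⟩ : ∃ x' : ℕ, x = (x' : Int) := ⟨x.toNat, (Int.toNat_of_nonneg (by omega)).symm⟩
        rw [PySem.List.pyGetD_natCast]
        exact (is_prime_iff n x' (by exact_mod_cast hb.1) (by omega)).2 hx
    · intro hx
      rw [List.mem_filter, PySem.List.mem_pyRange_one] at hx
      obtain ⟨⟨hx2, hxn⟩, hpred⟩ := hx
      obtain ⟨x', rfl⟩ : ∃ x' : ℕ, x = (x' : Int) := ⟨x.toNat, (Int.toNat_of_nonneg (by omega)).symm⟩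
      rw [PySem.List.pyGetD_natCast] at hpred
      exact (is_prime_iff n x' (by exact_mod_cast hx2) (by omega)).1 hpred

theorem build_eq (n : Int) : build n = build_alt n := by
  have hA : build n = ((sieveLoop n).2,
      (PySem.List.pyRange 4 (n + 1) 2).foldl
        (fun divs i =>
          match (sieveLoop n).1.find? (fun p => PySem.List.pyGetD (sieveLoop n).2 (i - p) false) with
          | some p => PySem.List.pySetD divs i p
          | none => divs)
        (List.replicate (n + 1).toNat 0)) := rfl
  have hB : build_alt n = ([false, false] ++ (PySem.List.pyRange 2 (n + 1) 1).map (fun i => isp i),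
      (PySem.List.pyRange 4 (n + 1) 2).foldl
        (fun divs i =>
          match ((PySem.List.pyRange 2 (n + 1) 1).filter
              (fun i => PySem.List.pyGetD
                ([false, false] ++ (PySem.List.pyRange 2 (n + 1) 1).map (fun i => isp i)) i false)).find?
              (fun p => PySem.List.pyGetD
                ([false, false] ++ (PySem.List.pyRange 2 (n + 1) 1).map (fun i => isp i)) (i - p) false) with
          | some p => PySem.List.pySetD divs i p
          | none => divs)
        (List.replicate (n + 1).toNat 0)) := rfl
  rw [hA, hB, ← is_prime_arrays_eq n, ← primes_eq n]

-- ===== VERDICT (by name: the statement is the Claim_ definition above) =====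
theorem build_spec : Claim_equal_build := by
  intro n _
  unfold Spec_build
  exact build_eq n
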